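-- pv_equiv track=rewrite | github.com/Rot-08/POTD | LeftRotateMatrix.py | left_rotate_matrix
-- ===== SOURCE A (Python) =====
-- def left_rotate_matrix(matrix, k):
--     # let the dimensions of the matrix be n x m
--     n, m = len(matrix), len(matrix[0])
--
--     # if k is bigger than the number of rows, reduce it to the modulo, to avoiding cycling through the matrix
--     if k > m:
--         k = k % m
--
--     for row in matrix:
--         temp = row[0:k]
--
--         for i in range(k, m):
--             row[i - k] = row[i]
--         row[m - k:] = temp
--     return matrix
-- ===== SOURCE B (Python) =====
-- def _rev(row, i, j):
--     # reverse row[i:j] in place with two pointers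
--     j -= 1
--     while i < j:
--         row[i], row[j] = row[j], row[i]
--         i += 1
--         j -= 1
--
--
-- def left_rotate_matrix(matrix, k):
--     m = len(matrix[0])
--     if k > m:
--         k = k % m
--     for row in matrix:
--         _rev(row, 0, k)
--         _rev(row, k, m)
--         _rev(row, 0, m)
--     return matrix
-- ===== Notes on version B (the rewrite author's own statement) =====
-- stated objective: alternative
-- what changed: B rotates each row in place by the classic three-reversal method (two-pointer sub-range reversals) instead of A's shift-with-temp loop (copy prefix, slide the tail left, slice-assign the prefix at the end).
-- outside the precondition, e.g. on left_rotate_matrix([[1, 2], [3, 4, 5]], 1): A returns [[2, 1], [4, 3]], B returns [[2, 1], [4, 3, 5]]; on left_rotate_matrix([[1, 2], [3]], 2): A returns [[1, 2], [3]], B raises IndexError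
import Mathlib
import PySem

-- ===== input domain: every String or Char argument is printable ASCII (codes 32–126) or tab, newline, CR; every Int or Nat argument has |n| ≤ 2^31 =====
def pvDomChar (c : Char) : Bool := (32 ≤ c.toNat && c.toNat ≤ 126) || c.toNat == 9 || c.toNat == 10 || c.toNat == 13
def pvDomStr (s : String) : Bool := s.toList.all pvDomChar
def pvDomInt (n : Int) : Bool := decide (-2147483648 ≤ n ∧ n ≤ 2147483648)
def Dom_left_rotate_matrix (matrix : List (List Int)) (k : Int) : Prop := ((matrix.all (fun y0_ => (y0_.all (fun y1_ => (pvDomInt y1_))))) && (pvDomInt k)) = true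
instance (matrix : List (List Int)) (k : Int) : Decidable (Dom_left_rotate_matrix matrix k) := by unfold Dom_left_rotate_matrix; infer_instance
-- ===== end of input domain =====

-- B rotates each row in place by the classic three-reversal method (two-pointer sub-range reversals)
-- instead of A's shift-with-temp element loop; objective: alternative algorithm, same cost.
-- Both Pythons mutate the row lists in place the same way; the theorems are about the return value.

-- ===== PORT A =====
def left_rotate_matrix (matrix : List (List Int)) (k : Int) : List (List Int) :=
  -- n, m = len(matrix), len(matrix[0])   (matrix[0] raises IndexError on []; excluded by Pre_, headD is unreachable default)
  let m : Int := ((matrix.headD []).length : Int)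
  -- if k > m: k = k % m   (ZeroDivisionError when m = 0; excluded by Pre_)
  let k' : Int := if k > m then PySem.Int.mod k m else k
  matrix.map (fun row =>
    -- temp = row[0:k]
    let temp := PySem.List.slice row (some 0) (some k')
    -- for i in range(k, m): row[i-k] = row[i]   (in-range on Pre_: pyGetD/pySetD total forms)
    let row := (PySem.List.pyRange k' m 1).foldl
      (fun r i => PySem.List.pySetD r (i - k') (PySem.List.pyGetD r i 0)) row
    -- row[m-k:] = temp   (slice-assignment up to the end: keep row[:m-k], append temp — exact)
    PySem.List.slice row none (some (m - k')) ++ temp)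

-- ===== PORT B =====
-- while i < j: row[i], row[j] = row[j], row[i]; i += 1; j -= 1   (indices in range on Pre_)
def revSwap (row : List Int) (i j : Int) : List Int :=
  if _h : i < j then
    revSwap
      (PySem.List.pySetD (PySem.List.pySetD row i (PySem.List.pyGetD row j 0)) j
        (PySem.List.pyGetD row i 0))
      (i + 1) (j - 1)
  else row
termination_by (j - i).toNat
decreasing_by omega

-- _rev(row, i, j): j -= 1, then the swap loop
def pyRev (row : List Int) (i j : Int) : List Int := revSwap row i (j - 1)

def left_rotate_matrix_alt (matrix : List (List Int)) (k : Int) : List (List Int) :=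
  let m : Int := ((matrix.headD []).length : Int)
  let k' : Int := if k > m then PySem.Int.mod k m else k
  matrix.map (fun row => pyRev (pyRev (pyRev row 0 k') k' m) 0 m)

-- ===== PRECONDITION & SPEC =====
-- Pre_ excludes: the empty matrix and negative k (A raises IndexError), k > 0 with an empty first
-- row (A raises ZeroDivisionError), and ragged matrices — malformed input for a per-row rotation,
-- on which A either raises IndexError or applies the first row's length to the other rows while
-- B's sub-range reversals raise or leave the surplus tail in place (see the cited examples).
def Pre_left_rotate_matrix (matrix : List (List Int)) (k : Int) : Prop :=
  matrix ≠ [] ∧ 0 ≤ k ∧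
  (∀ row ∈ matrix, row.length = (matrix.headD []).length) ∧
  ((matrix.headD []).length = 0 → k = 0)
instance (matrix : List (List Int)) (k : Int) : Decidable (Pre_left_rotate_matrix matrix k) := by
  unfold Pre_left_rotate_matrix; infer_instance

def pvWitness_left_rotate_matrix : List (List Int) × Int := ([[1, 2, 3], [4, 5, 6]], 2)

def Spec_left_rotate_matrix (matrix : List (List Int)) (k : Int) (out : List (List Int)) : Prop := out = left_rotate_matrix_alt matrix k
instance (matrix : List (List Int)) (k : Int) (out : List (List Int)) : Decidable (Spec_left_rotate_matrix matrix k out) := by unfold Spec_left_rotate_matrix; infer_instance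

-- ===== CLAIM (what is proved, stated in full; the proofs are below) =====
def Claim_equal_left_rotate_matrix : Prop := ∀ (matrix : List (List Int)) (k : Int), Dom_left_rotate_matrix matrix k → Pre_left_rotate_matrix matrix k → Spec_left_rotate_matrix matrix k (left_rotate_matrix matrix k)

-- ===== LEMMAS AND PROOFS =====

-- A's inner shift loop: after c steps the first c cells hold row[K..K+c) and the rest is untouched.
theorem afold_inv (row : List Int) (K : Nat) (hK : K ≤ row.length) :
    ∀ c, c ≤ row.length - K →
      ((List.range c).map (fun t => ((K + t : Nat) : Int))).foldl
          (fun r i => PySem.List.pySetD r (i - (K : Int)) (PySem.List.pyGetD r i 0)) row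
        = (row.drop K).take c ++ row.drop c := by
  intro c hc
  induction c with
  | zero => simp
  | succ c ih =>
    simp only [List.range_succ, List.map_append, List.foldl_append, List.map_cons,
      List.map_nil, List.foldl_cons, List.foldl_nil]
    rw [ih (by omega)]
    have hlt : K + c < row.length := by omega
    have hlen : ((row.drop K).take c).length = c := by
      simp; omega
    have hget : PySem.List.pyGetD ((row.drop K).take c ++ row.drop c) (((K + c : Nat) : Int)) 0
        = row[K + c] := by
      rw [PySem.List.pyGetD_natCast]
      rw [List.getD_append_right _ _ _ _ (by omega), hlen]
      have h2 : K + c - c = K := by omega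
      rw [h2, List.getD_eq_getElem _ _ (by simp; omega)]
      simp [Nat.add_comm]
    have hidx : ((K + c : Nat) : Int) - (K : Int) = ((c : Nat) : Int) := by push_cast; ring
    rw [hget, hidx, PySem.List.pySetD_natCast]
    rw [List.set_append_right _ _ (by omega : (List.take c (List.drop K row)).length ≤ c), hlen]
    have h0 : c - c = 0 := by omega
    rw [h0, List.drop_eq_getElem_cons (by omega : c < row.length), List.set_cons_zero]
    rw [List.take_add_one, List.getElem?_drop]
    have h3 : K + c < row.length := by omega
    simp [List.getElem?_eq_getElem h3, List.append_assoc]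

-- revSwap reverses the middle segment.
theorem revSwap_reverse (n : Nat) :
    ∀ (pre mid suf : List Int), mid.length = n →
      revSwap (pre ++ (mid ++ suf)) (pre.length : Int)
          ((pre.length : Int) + (mid.length : Int) - 1)
        = pre ++ (mid.reverse ++ suf) := by
  induction n using Nat.strong_induction_on with
  | _ n ih =>
    intro pre mid suf hlen
    by_cases hsmall : mid.length ≤ 1
    · have hij : ¬ ((pre.length : Int) < (pre.length : Int) + (mid.length : Int) - 1) := by
        omega
      rw [revSwap, dif_neg hij]
      rcases mid with _ | ⟨x, _ | ⟨y, t⟩⟩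
      · simp
      · simp
      · simp at hsmall
    · rcases mid with _ | ⟨x, rest⟩
      · simp at hsmall
      rcases List.eq_nil_or_concat' rest with hr | ⟨ys, z, hyz⟩
      · subst hr; simp at hsmall
      subst hyz
      have hlen2 : (x :: (ys ++ [z])).length = ys.length + 2 := by simp
      have hrow : pre ++ ((x :: (ys ++ [z])) ++ suf) = (pre ++ x :: ys) ++ (z :: suf) := by
        simp
      have hj : (pre.length : Int) + ((x :: (ys ++ [z])).length : Int) - 1
          = ((pre.length + ys.length + 1 : Nat) : Int) := by
        rw [hlen2]; push_cast; ring
      have hij : (pre.length : Int) < (pre.length : Int) + ((x :: (ys ++ [z])).length : Int) - 1 := by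
        rw [hlen2]; push_cast; omega
      rw [revSwap, dif_pos hij, hj]
      have hg2 : PySem.List.pyGetD (pre ++ ((x :: (ys ++ [z])) ++ suf))
          ((pre.length + ys.length + 1 : Nat) : Int) 0 = z := by
        rw [hrow, PySem.List.pyGetD_natCast,
          List.getD_append_right _ _ _ _ (by simp only [List.length_append, List.length_cons]; omega)]
        simp
      have hg1 : PySem.List.pyGetD (pre ++ ((x :: (ys ++ [z])) ++ suf)) ((pre.length : Nat) : Int) 0
          = x := by
        rw [PySem.List.pyGetD_natCast, List.getD_append_right _ _ _ _ (by simp)]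
        simp
      have hs1 : (pre ++ ((x :: (ys ++ [z])) ++ suf)).set pre.length z
          = pre ++ ((z :: (ys ++ [z])) ++ suf) := by
        rw [List.set_append_right _ _ (by simp)]
        simp
      have hs2 : (pre ++ ((z :: (ys ++ [z])) ++ suf)).set (pre.length + ys.length + 1) x
          = (pre ++ [z]) ++ (ys ++ (x :: suf)) := by
        have : pre ++ ((z :: (ys ++ [z])) ++ suf) = (pre ++ z :: ys) ++ (z :: suf) := by simp
        rw [this, List.set_append_right _ _ (by simp only [List.length_append, List.length_cons]; omega)]
        simp
      rw [hg1, hg2]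
      simp only [PySem.List.pySetD_natCast]
      rw [hs1, hs2]
      have hi1 : (pre.length : Int) + 1 = (((pre ++ [z]).length : Nat) : Int) := by
        simp only [List.length_append, List.length_singleton]; omega
      have hj1 : ((pre.length + ys.length + 1 : Nat) : Int) - 1
          = (((pre ++ [z]).length : Int) + (ys.length : Int) - 1) := by
        simp only [List.length_append, List.length_singleton]; omega
      rw [hi1, hj1]
      rw [ih ys.length (by omega) (pre ++ [z]) ys (x :: suf) rfl]
      simp

theorem pyRev_seg (pre mid suf : List Int) :
    pyRev (pre ++ (mid ++ suf)) (pre.length : Int) ((pre.length : Int) + (mid.length : Int))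
      = pre ++ (mid.reverse ++ suf) := by
  unfold pyRev
  exact revSwap_reverse mid.length pre mid suf rfl

-- both per-row transforms are the left rotation by K
theorem rowA_eq (row : List Int) (K : Nat) (hK : K ≤ row.length) :
    (PySem.List.slice
        ((PySem.List.pyRange (K : Int) (row.length : Int) 1).foldl
          (fun r i => PySem.List.pySetD r (i - (K : Int)) (PySem.List.pyGetD r i 0)) row)
        none (some ((row.length : Int) - (K : Int))))
      ++ PySem.List.slice row (some 0) (some (K : Int))
      = row.drop K ++ row.take K := by
  have hrange : PySem.List.pyRange (K : Int) (row.length : Int) 1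
      = (List.range (row.length - K)).map (fun t => ((K + t : Nat) : Int)) := by
    rw [PySem.List.pyRange_one]
    have h1 : ((row.length : Int) - (K : Int)).toNat = row.length - K := by omega
    rw [h1]
    exact List.map_congr_left (fun t _ => by push_cast; ring)
  rw [hrange, afold_inv row K hK (row.length - K) (le_refl _)]
  have hslice : PySem.List.slice
      ((row.drop K).take (row.length - K) ++ row.drop (row.length - K))
      none (some ((row.length : Int) - (K : Int)))
      = row.drop K := by
    rw [PySem.List.slice_to _ (by omega)]
    have h1 : ((row.length : Int) - (K : Int)).toNat = row.length - K := by omega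
    have h2 : (row.drop K).take (row.length - K) = row.drop K := by
      apply List.take_of_length_le
      simp
    rw [h1, h2]
    rw [List.take_append_of_le_length (by simp)]
    exact h2
  have htemp : PySem.List.slice row (some 0) (some (K : Int)) = row.take K := by
    rw [PySem.List.slice_zero_start, PySem.List.slice_to _ (by omega)]
    simp
  rw [hslice, htemp]

theorem rowB_eq (row : List Int) (K : Nat) (hK : K ≤ row.length) :
    pyRev (pyRev (pyRev row 0 (K : Int)) (K : Int) (row.length : Int)) 0 (row.length : Int)
      = row.drop K ++ row.take K := by
  have hlt : ((row.take K).length : Int) = (K : Int) := by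
    simp [List.length_take, Nat.min_eq_left hK]
  have h1 : pyRev row 0 (K : Int) = (row.take K).reverse ++ row.drop K := by
    have h := pyRev_seg [] (row.take K) (row.drop K)
    simp only [List.nil_append, List.take_append_drop, List.length_nil, Nat.cast_zero,
      zero_add] at h
    rwa [hlt] at h
  have h2 : pyRev ((row.take K).reverse ++ row.drop K) (K : Int) (row.length : Int)
      = (row.take K).reverse ++ (row.drop K).reverse := by
    have h := pyRev_seg (row.take K).reverse (row.drop K) []
    simp only [List.append_nil] at h
    have hl1 : (((row.take K).reverse).length : Int) = (K : Int) := by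
      simpa using hlt
    have hl2 : (((row.take K).reverse).length : Int) + ((row.drop K).length : Int)
        = (row.length : Int) := by
      simp [List.length_take, List.length_drop, Nat.min_eq_left hK]
      omega
    rw [hl1] at h
    rw [← hl2, hl1]
    exact h
  have h3 : pyRev ((row.take K).reverse ++ (row.drop K).reverse) 0 (row.length : Int)
      = row.drop K ++ row.take K := by
    have h := pyRev_seg [] ((row.take K).reverse ++ (row.drop K).reverse) []
    simp only [List.nil_append, List.append_nil, List.length_nil, Nat.cast_zero, zero_add] at h
    have hl3 : ((((row.take K).reverse ++ (row.drop K).reverse)).length : Int)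
        = (row.length : Int) := by
      simp [List.length_take, List.length_drop, Nat.min_eq_left hK]
      omega
    rw [hl3] at h
    simpa [List.reverse_append] using h
  rw [h1, h2, h3]

-- ===== VERDICT (by name: the statement is the Claim_ definition above) =====
theorem left_rotate_matrix_spec : Claim_equal_left_rotate_matrix := by
  intro matrix k _hdom hpre
  obtain ⟨_hne, hk0, hrect, hzero⟩ := hpre
  unfold Spec_left_rotate_matrix
  simp only [left_rotate_matrix, left_rotate_matrix_alt]
  apply List.map_congr_left
  intro row hrow
  set M := (matrix.headD []).length with hM
  set k' : Int := (if k > (M : Int) then PySem.Int.mod k (M : Int) else k) with hk'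
  have hMpos : k > (M : Int) → 0 < (M : Int) := by
    intro h
    rcases Nat.eq_zero_or_pos M with h0 | h0
    · have := hzero h0
      omega
    · omega
  have hk'0 : 0 ≤ k' := by
    rw [hk']
    split_ifs with h
    · exact PySem.Int.mod_nonneg _ (hMpos h)
    · exact hk0
  have hk'le : k' ≤ (M : Int) := by
    rw [hk']
    split_ifs with h
    · exact le_of_lt (PySem.Int.mod_lt _ (hMpos h))
    · omega
  have hcast : (k'.toNat : Int) = k' := Int.toNat_of_nonneg hk'0
  have hlen : row.length = M := hrect row hrow
  have ha := rowA_eq row k'.toNat (by omega)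
  have hb := rowB_eq row k'.toNat (by omega)
  rw [hcast, hlen] at ha hb
  rw [ha, hb]
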